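-- pv_equiv track=rewrite | github.com/akshay-greenlang/Code-V1_GreenLang | packs/ghg-accounting/PACK-050-consolidation/integrations/pack_orchestrator.py | _get_all_downstream
-- ===== SOURCE A (Python) =====
-- from collections import deque
-- from enum import Enum
-- from typing import Any, Callable, Coroutine, Dict, List, Optional, Set
--
-- class PipelinePhase(str, Enum):
--     """Enumeration of the 10 consolidation pipeline phases."""
--
--     INIT = "init"
--     ENTITY_REGISTRY = "entity_registry"
--     OWNERSHIP = "ownership"
--     BOUNDARY = "boundary"
--     DATA_COLLECTION = "data_collection"
--     CONSOLIDATION = "consolidation"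
--     ELIMINATION = "elimination"
--     ADJUSTMENT = "adjustment"
--     REPORTING = "reporting"
--     AUDIT = "audit"
--
-- PHASE_DEPENDENCIES: Dict[PipelinePhase, List[PipelinePhase]] = {
--     PipelinePhase.INIT: [],
--     PipelinePhase.ENTITY_REGISTRY: [PipelinePhase.INIT],
--     PipelinePhase.DATA_COLLECTION: [PipelinePhase.INIT],
--     PipelinePhase.OWNERSHIP: [PipelinePhase.ENTITY_REGISTRY],
--     PipelinePhase.BOUNDARY: [PipelinePhase.OWNERSHIP],
--     PipelinePhase.CONSOLIDATION: [
--         PipelinePhase.BOUNDARY,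
--         PipelinePhase.DATA_COLLECTION,
--     ],
--     PipelinePhase.ELIMINATION: [PipelinePhase.CONSOLIDATION],
--     PipelinePhase.ADJUSTMENT: [PipelinePhase.ELIMINATION],
--     PipelinePhase.REPORTING: [PipelinePhase.ADJUSTMENT],
--     PipelinePhase.AUDIT: [PipelinePhase.ADJUSTMENT],
-- }
--
-- def _get_all_downstream(phase: PipelinePhase) -> Set[PipelinePhase]:
--     """Get all downstream phases that depend on the given phase."""
--     downstream: Set[PipelinePhase] = set()
--     queue: deque[PipelinePhase] = deque([phase])
--     while queue:
--         current = queue.popleft()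
--         for p, deps in PHASE_DEPENDENCIES.items():
--             if current in deps and p not in downstream:
--                 downstream.add(p)
--                 queue.append(p)
--     return downstream
-- ===== SOURCE B (Python) =====
-- from collections import deque
-- from enum import Enum
-- from typing import Dict, List, Set
--
-- class PipelinePhase(str, Enum):
--     INIT = "init"
--     ENTITY_REGISTRY = "entity_registry"
--     OWNERSHIP = "ownership"
--     BOUNDARY = "boundary"
--     DATA_COLLECTION = "data_collection"
--     CONSOLIDATION = "consolidation"
--     ELIMINATION = "elimination"
--     ADJUSTMENT = "adjustment"
--     REPORTING = "reporting"
--     AUDIT = "audit"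
--
-- PHASE_DEPENDENCIES: Dict[PipelinePhase, List[PipelinePhase]] = {
--     PipelinePhase.INIT: [],
--     PipelinePhase.ENTITY_REGISTRY: [PipelinePhase.INIT],
--     PipelinePhase.DATA_COLLECTION: [PipelinePhase.INIT],
--     PipelinePhase.OWNERSHIP: [PipelinePhase.ENTITY_REGISTRY],
--     PipelinePhase.BOUNDARY: [PipelinePhase.OWNERSHIP],
--     PipelinePhase.CONSOLIDATION: [
--         PipelinePhase.BOUNDARY,
--         PipelinePhase.DATA_COLLECTION,
--     ],
--     PipelinePhase.ELIMINATION: [PipelinePhase.CONSOLIDATION],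
--     PipelinePhase.ADJUSTMENT: [PipelinePhase.ELIMINATION],
--     PipelinePhase.REPORTING: [PipelinePhase.ADJUSTMENT],
--     PipelinePhase.AUDIT: [PipelinePhase.ADJUSTMENT],
-- }
--
-- def _get_all_downstream(phase: PipelinePhase) -> Set[PipelinePhase]:
--     """BFS over a prebuilt reverse-adjacency (children) index instead of
--     rescanning the whole dependency dict at every step."""
--     children: Dict[PipelinePhase, List[PipelinePhase]] = {}
--     for p, deps in PHASE_DEPENDENCIES.items():
--         for dep in deps:
--             children.setdefault(dep, []).append(p)
--     downstream: Set[PipelinePhase] = set()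
--     queue = deque([phase])
--     while queue:
--         node = queue.popleft()
--         for child in children.get(node, []):
--             if child not in downstream:
--                 downstream.add(child)
--                 queue.append(child)
--     return downstream
-- ===== Notes on version B (the rewrite author's own statement) =====
-- stated objective: simpler
-- what changed: B builds a reverse-adjacency (children) index in one pass over PHASE_DEPENDENCIES and then runs a plain BFS over that index, instead of A's BFS that rescans the entire dependency dict on every popped node.
import Mathlib
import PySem

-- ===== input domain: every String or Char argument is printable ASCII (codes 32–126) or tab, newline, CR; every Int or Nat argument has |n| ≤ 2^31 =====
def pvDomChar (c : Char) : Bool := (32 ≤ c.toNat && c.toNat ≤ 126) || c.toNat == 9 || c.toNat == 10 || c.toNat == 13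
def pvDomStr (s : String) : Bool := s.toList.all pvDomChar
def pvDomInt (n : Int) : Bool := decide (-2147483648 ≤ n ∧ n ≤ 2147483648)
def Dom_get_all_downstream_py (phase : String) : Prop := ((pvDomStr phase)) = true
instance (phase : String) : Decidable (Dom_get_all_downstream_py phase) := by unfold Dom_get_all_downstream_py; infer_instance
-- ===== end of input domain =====

-- B replaces A's per-step scan of the whole dependency dict by a one-pass reverse-adjacency
-- (children) index walked by a plain BFS: simpler traversal, same returned set.

-- The fixed PHASE_DEPENDENCIES dict, in its Python insertion order.
def phaseDeps : List (String × List String) :=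
  [("init", []),
   ("entity_registry", ["init"]),
   ("data_collection", ["init"]),
   ("ownership", ["entity_registry"]),
   ("boundary", ["ownership"]),
   ("consolidation", ["boundary", "data_collection"]),
   ("elimination", ["consolidation"]),
   ("adjustment", ["elimination"]),
   ("reporting", ["adjustment"]),
   ("audit", ["adjustment"])]

-- ===== PORT A =====
-- inner 'for p, deps in PHASE_DEPENDENCIES.items()' loop over (downstream, queue)
def aScan (current : String) (st : List String × List String) : List String × List String :=
  phaseDeps.foldl
    (fun st pd =>
      if pd.2.contains current && !(st.1.contains pd.1)
      then (PySem.Set.add st.1 pd.1, st.2 ++ [pd.1])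
      else st)
    st

-- 'while queue:' loop; fuel bounds the number of pops, which is at most
-- 1 + |downstream| ≤ 1 + 10 (each enqueue after the start adds a new key to downstream), so 12 never runs out.
def aLoop : Nat → List String → List String → List String
  | 0, downstream, _ => downstream
  | fuel + 1, downstream, queue =>
    match queue with
    | [] => downstream
    | current :: rest => let st := aScan current (downstream, rest); aLoop fuel st.1 st.2

def get_all_downstream_py (phase : String) : List String :=
  aLoop 12 [] [phase]

-- ===== PORT B =====
-- one pass over PHASE_DEPENDENCIES: children[dep].append(p)  (setdefault = Dict.modify with default [])
def childrenIdx : PySem.Dict String (List String) :=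
  phaseDeps.foldl
    (fun d pd => pd.2.foldl (fun d dep => d.modify dep [] (· ++ [pd.1])) d)
    PySem.Dict.empty

-- BFS over the prebuilt children index
def bLoop : Nat → List String → List String → List String
  | 0, downstream, _ => downstream
  | fuel + 1, downstream, queue =>
    match queue with
    | [] => downstream
    | node :: rest =>
      let st := (childrenIdx.getD node []).foldl
        (fun (st : List String × List String) child =>
          if st.1.contains child then st
          else (PySem.Set.add st.1 child, st.2 ++ [child]))
        (downstream, rest)
      bLoop fuel st.1 st.2

def get_all_downstream_py_alt (phase : String) : List String :=
  bLoop 12 [] [phase]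

-- ===== PRECONDITION & SPEC =====
def Spec_get_all_downstream_py (phase : String) (out : List String) : Prop := out = get_all_downstream_py_alt phase
instance (phase : String) (out : List String) : Decidable (Spec_get_all_downstream_py phase out) := by unfold Spec_get_all_downstream_py; infer_instance

-- ===== CLAIM (what is proved, stated in full; the proofs are below) =====
def Claim_equal_get_all_downstream_py : Prop := ∀ (phase : String), Dom_get_all_downstream_py phase → Spec_get_all_downstream_py phase (get_all_downstream_py phase)

-- ===== LEMMAS AND PROOFS =====

theorem equal_aux (phase : String) :
    get_all_downstream_py phase = get_all_downstream_py_alt phase := by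
  by_cases h : phase ∈ ["init", "entity_registry", "data_collection", "ownership", "boundary",
      "consolidation", "elimination", "adjustment", "reporting", "audit"]
  · fin_cases h <;> decide
  · simp only [List.mem_cons, List.not_mem_nil, or_false, not_or] at h
    obtain ⟨h1, h2, h3, h4, h5, h6, h7, h8, h9, h10⟩ := h
    have hc : childrenIdx = PySem.Dict.mk
        [("init", ["entity_registry", "data_collection"]),
         ("entity_registry", ["ownership"]),
         ("ownership", ["boundary"]),
         ("boundary", ["consolidation"]),
         ("data_collection", ["consolidation"]),
         ("consolidation", ["elimination"]),
         ("elimination", ["adjustment"]),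
         ("adjustment", ["reporting", "audit"])] := by decide
    simp [get_all_downstream_py, get_all_downstream_py_alt, aLoop, bLoop, aScan, hc,
      phaseDeps, PySem.Dict.getD, PySem.Dict.get?,
      h1, h2, h3, h4, h5, h6, h7, h8, Ne.symm h1, Ne.symm h2, Ne.symm h3, Ne.symm h4,
      Ne.symm h5, Ne.symm h6, Ne.symm h7, Ne.symm h8]

-- ===== VERDICT (by name: the statement is the Claim_ definition above) =====
theorem get_all_downstream_py_spec : Claim_equal_get_all_downstream_py := by
  intro phase _
  unfold Spec_get_all_downstream_py
  exact equal_aux phase
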